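/- GENERATED by mk_final_copies.py from the proof of the farm's unit `start_decoder.R1b` (farm:start_decoder.R1b.1: Proof.lean) as the
   re-elaboration sweep compiled it — do not edit. -/
import Asan.CheckWalk
import Vorbis.Spec.Reader
import Vorbis.Spec.Units.start_decoder_R1b

open X86 X86.User Asan Vorbis Vorbis.Spec Vorbis.Spec.StartDecoder

set_option maxRecDepth 4000
set_option maxHeartbeats 4000000

namespace Vorbis.Spec.start_decoder_R1b

/-- **Segment R1b of `start_decoder`** (`cut231` 0x115905 … 0x115925, returns into `cut232` 0x11592a): `f->residue_count = z + 1` (check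
site 0x115910: store4 at `f + 320`, inside `*f`), `setup_malloc(f, (z + 1) << 5)` with its precondition `ArenaPre` (the arena layer
carried over the store and the pushed return addresses by `ArenaOK.frame`). At the return: `Frame`'s and `Mid`'s memory parts at the
call state by `FInv.carry` / `Mid.carry` (the store lies in `[f + Mid.hi 6, f + restFrom 7)`), then ONE lemma per case of the callee's
post: `SecPt.alloc_call` (the request fits: the point for the grown ghost, `Since A.1 …`) or `SecPt.alloc_fail_small` (it does not:
32·rc ≤ 2048). `residue_count = z + 1` is read through the nest of stores (`u_read`) and the callee's footprint. -/
theorem segR1b_walk {Lay : Layout} (hLay : Lay.hi = 0x1000000) {μ : Microarch} (hμ : UserX.MicroOK μ) {u₀ : State}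
    (hcode : HasCodeNat Lay u₀ Vorbis.L.start_decoder.entry Vorbis.Code.code_start_decoder.nat Vorbis.L.start_decoder.size)
    (hstore4 : Asan.SmallCheck Lay μ Vorbis.WayInv (Vorbis.CodeOK u₀) [.rax, .rcx, .rdx] 4 Vorbis.L.__asan_store4_noabort.entry)
    (h_setup_malloc : ∀ (others : List Obj) (frames : List (Nat × FrameLayout)) (A : Arena),
      Calls Lay μ Vorbis.WayInv (Vorbis.conv u₀) Vorbis.L.setup_malloc.entry (Vorbis.Spec.setup_malloc.spec others frames A))
    {g : Ghost} {v : State} {A : Arena × List Obj} (hb : BodyR1a u₀ g A v) :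
    ReachVia Lay μ WayInv v (fun w => AtR1b u₀ g w) := by
  have hpt := hb.pt
  have hfr := hpt.frame
  have hh := hpt.hand
  have hm := hpt.mid
  have hp : Pos g A := hpt.pos
  have hz := hb.rax
  have he := hfr.entry
  v_entry he
  obtain ⟨hRa, hR8⟩ := hfr.r_eq
  simp only [steady, Ghost.RA] at hRa
  simp only [depth] at he_room he_stack
  have hflo := hp.f_lo
  have hf2 := hp.f_hi
  have hf3 := hp.f_stack
  simp only [Ghost.RA] at hf3
  have hRn : (addr g.R).toNat = g.R := toNat_addr _ (by omega)
  have hfn : (addr g.f).toNat = g.f := toNat_addr _ (by omega)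
  have w_rip := hfr.rip
  have c_rsp := hfr.rsp
  have c_rbp := hpt.rbp
  have w_eq : Mem.EqOn Vorbis.L.textLo Vorbis.L.textHi u₀.mem v.mem := hfr.code
  have hdf : v.flags .df = false := (show abiInv _ from hfr.inv).1
  have hmx : v.mxcsr &&& 0x1F80 = 0x1F80 := (show abiInv _ from hfr.inv).2
  have hsse := Vorbis.sseOK_of_abiInv hfr.inv
  have hsm := h_setup_malloc A.2 g.frames' A.1
  u_walk hcode [hμ.vendor] until [Vorbis.L.start_decoder.cut232] span [Vorbis.L.textLo, Vorbis.L.textHi] side (v_side)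
  case check_115910 =>
    have hun : ShadowUntouched v.mem s_115910.mem := by v_untouched
    refine (hh.obj.mono (frames'_sub g A.2)).accSmall hfr.shadow hun _ 4 (by decide) (by u_omega) ?_
    simp only [Off.sizeof.stb_vorbis]
    u_omega
  case call_inv => v_inv
  case pre_115925 =>
    have hun : ShadowUntouched v.mem s_115925.mem := by v_untouched
    have hs : Mem.SameExcept [⟨g.R - 8, g.R⟩, ⟨g.f + 320, g.f + 324⟩] v.mem s_115925.mem := by u_same
    refine ⟨shadowPre_call hfr (by rw [w_rsp]; u_omega) hun, ?_, ?_, hh.arenaText⟩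
    · rw [w_rdi, hfn]
      exact (hh.obj.mono (frames'_sub g A.2)).blockLive
    · rw [w_rdi, hfn]
      apply hm.arena.frame (by simp only [Off.sizeof.stb_vorbis]; omega)
      apply hs.eqOn
      intro w hw
      simp only [List.mem_cons, List.mem_nil_iff, or_false] at hw
      rcases hw with rfl | rfl <;> simp only [voff] <;> omega
  -- the returned state (0x11592a): the facts about the call state `s_115925`
  have hsp : (s_115925.reg .rsp).toNat + 8 = g.R := by
    rw [w_rsp_115925]
    u_omega
  have hrdi : (s_115925.reg .rdi).toNat = g.f := by
    rw [w_rdi_115925]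
    exact hfn
  have hz1 : (v.reg .rax + 1).toNat = (v.reg .rax).toNat + 1 := by
    u_omega
  have hrc : (BitVec.setWidth 32 (v.reg .rax + 1).toBitVec).toNat = (v.reg .rax).toNat + 1 := by
    rw [BitVec.toNat_setWidth, UInt64.toNat_toBitVec, hz1]
    omega
  have hn : (s_115925.reg .rsi).toNat % 2 ^ 32 = 32 * ((v.reg .rax).toNat + 1) := by
    rw [w_rsi_115925, Vorbis.toNat_ofBV32, BitVec.toNat_shiftLeft, hrc, Nat.shiftLeft_eq]
    omega
  -- `Frame`'s and `Mid`'s memory parts at the call state: the own store of `residue_count` and the two pushed return addresses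
  have hun0 : ShadowUntouched v.mem s_115925.mem := by v_untouched
  have hs0 : Mem.SameExcept [⟨g.R - 8, g.R⟩, ⟨g.f + 320, g.f + 324⟩] v.mem s_115925.mem := by u_same
  have hws0 : ∀ w, w ∈ [(⟨g.R - 8, g.R⟩ : Span), ⟨g.f + 320, g.f + 324⟩] → MidWin g 6 7 A.1 A w := by
    intro w hw
    simp only [List.mem_cons, List.mem_nil_iff, or_false] at hw
    have e1 : Mid.hi 6 = 320 := by decide
    have e2 : restFrom 7 = 464 := by decide
    unfold MidWin
    rcases hw with rfl | rfl
    · left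
      simp only []
      omega
    · right; right; right; right; right; left
      rw [e1, e2]
      simp only []
      omega
  have hbits0 : Bits (g.Blk A) g.len s_115925.mem g.f := by
    apply bits_kept hp hm.bits hs0
    intro w hw
    simp only [List.mem_cons, List.mem_nil_iff, or_false] at hw
    rcases hw with rfl | rfl
    · left
      simp only []
      omega
    · right; right; left
      simp only []
      omega
  have hf1 : FInv g A s_115925.mem := (FInv.of hfr).carry hp hs0 hun0 (fun w hw => (hws0 w hw).secWin)
  have hm1 : Mid g 6 6 7 A.1 A s_115925.mem := hm.carry hp hs0 hun0 hws0 hbits0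
  -- the callee's footprint, in the callee's terms
  have hsame := w_same
  simp only [X86.User.Spec.footprint, vspec] at hsame
  -- `residue_count` at the call state, and after the call
  have hcnt0 : s_115925.mem.readLE (addr g.f + 320) 4 = (BitVec.setWidth 32 (v.reg .rax + 1).toBitVec).toNat := by
    rw [w_mem_115925]
    u_read
  have hspn : (s_115925.reg .rsp).toNat = g.R - 8 := by omega
  have ea : (addr g.f + 320).toNat = g.f + 320 := by u_omega
  have a1 := hm.arena.AR1
  have a2 := hm.arena.AR2
  have hcnt1 : s_115925r.mem.readLE (addr g.f + 320) 4 = (v.reg .rax).toNat + 1 := by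
    rw [← hrc, ← hcnt0]
    apply hsame.readLE (addr g.f + 320) 4 (by omega)
    intro w hw
    simp only [List.mem_cons, List.mem_nil_iff, or_false] at hw
    rcases hw with rfl | rfl | rfl | rfl
    · simp only []
      rw [ea, hspn]
      omega
    · simp only []
      rw [ea, hrdi]
      omega
    · simp only []
      rw [ea, hrdi]
      omega
    · simp only [shadowSpan]
      rw [ea]
      omega
  have hcount : stb_vorbis.residue_count s_115925r.mem g.f = (((v.reg .rax).toNat + 1 : Nat) : Int) := by
    simp only [vacc, voff]
    rw [Mem.i32_def]
    unfold Mem.u32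
    rw [← addr_add_lit, hcnt1]
    have hc := sint32_cases ((v.reg .rax).toNat + 1)
    omega
  have hcodeOK : CodeOK u₀ s_115925r.mem := Vorbis.conv_code_eqOn w_code
  have hrbp : s_115925r.reg .rbp = addr g.f := by
    rw [w_kept.get .rbp rfl]
    exact c_rbp
  by_cases hfit : A.1.Fits ((s_115925.reg .rsi).toNat % 2 ^ 32)
  · -- the block was allocated: the ghost grows, `Since A.1 …`
    obtain ⟨hpt', hrax, _, hsince⟩ :=
      SecPt.alloc_call hfr hh hp hf1 hm1 hsp hrdi hsame w_post hfit w_rip w_rsp hcodeOK w_inv hrbp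
    rw [hn] at hpt' hsince
    refine ReachVia.done ⟨A, _, (v.reg .rax).toNat + 1, hpt', ⟨Or.inr ⟨?_, rfl, hsince⟩⟩, hcount, by omega, by omega⟩
    omega
  · -- the request did not fit: NULL, the same ghost (32·rc ≤ 2048: the shadow window of the footprint stays in the shadow region)
    -- the failure clause, conjunct by conjunct (freeze-9's contract has a fourth one behind `ShadowUntouched`)
    have hq := w_post.2 hfit
    have hrax : s_115925r.reg .rax = 0 := hq.1
    have hun : ShadowUntouched s_115925.mem s_115925r.mem := by
      first
        | exact hq.2.2
        | exact hq.2.2.1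
    obtain ⟨hpt', _⟩ :=
      SecPt.alloc_fail_small hfr hh hp hf1 hm1 hsp hrdi hsame hq.2.1 hun (by omega) w_rip w_rsp hcodeOK w_inv hrbp
    exact ReachVia.done ⟨A, A, (v.reg .rax).toNat + 1, hpt', ⟨Or.inl ⟨hrax, rfl⟩⟩, hcount, by omega, by omega⟩

end Vorbis.Spec.start_decoder_R1b

/-- The unit `start_decoder.R1b`: `segR1b_walk` at every entry state. -/
theorem Vorbis.Spec.Worked.start_decoder_R1b_ok : Vorbis.Spec.start_decoder_R1b.Statement := by
  intro Lay hLay μ hμ u₀ hcode hstore4 h_setup_malloc g v hat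
  obtain ⟨A, hb⟩ := hat
  exact Vorbis.Spec.start_decoder_R1b.segR1b_walk hLay hμ hcode hstore4 h_setup_malloc hb
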